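-- pv_equiv track=rewrite | github.com/pypi-data/pypi-mirror-398 | packages/PGAP2/pgap2-1.0.8.tar.gz/pgap2-1.0.8/pgap2/lib/tree.py | has_para
-- ===== SOURCE A (Python) =====
-- def has_para(clusts):
--     clust_a = clusts[0]
--     strain_set = set([_.split(':')[0] for _ in clust_a])
--     for clust_b in clusts[1:]:
--         clust_b_strain_set = set([_.split(':')[0] for _ in clust_b])
--         if strain_set & clust_b_strain_set:
--             return True
--         else:
--             strain_set |= clust_b_strain_set
--     return False
-- ===== SOURCE B (Python) =====
-- def has_para(clusts):
--     # One flat tally pass: collect each cluster's distinct strains, then a strain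
--     # spans two clusters iff the flat collection contains a duplicate.
--     flat = [s for c in clusts for s in {x.split(':')[0] for x in c}]
--     return len(flat) != len(set(flat))
-- ===== Notes on version B (the rewrite author's own statement) =====
-- stated objective: simpler
-- what changed: A incrementally unions per-cluster strain sets and tests each new cluster against the running union with early exit; B builds one flat list of each cluster's distinct strains in a single comprehension and reports a duplicate via len(flat) != len(set(flat)).
import Mathlib
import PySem

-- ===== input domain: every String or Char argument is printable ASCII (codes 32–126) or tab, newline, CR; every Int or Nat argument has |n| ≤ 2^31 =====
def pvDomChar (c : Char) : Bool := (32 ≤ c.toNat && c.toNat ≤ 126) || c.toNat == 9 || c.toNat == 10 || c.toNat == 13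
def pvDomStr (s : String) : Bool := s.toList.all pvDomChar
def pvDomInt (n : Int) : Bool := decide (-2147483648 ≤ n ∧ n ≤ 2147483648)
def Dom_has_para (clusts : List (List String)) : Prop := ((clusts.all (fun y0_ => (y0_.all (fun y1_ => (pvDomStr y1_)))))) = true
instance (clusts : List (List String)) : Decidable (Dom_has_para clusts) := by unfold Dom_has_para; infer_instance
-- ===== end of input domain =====

-- B replaces A's ordered union-plus-intersection scan with one flat list of per-cluster
-- distinct strains and a single duplicate test (simpler decomposition, same cost).


-- shared helper: _.split(':')[0] (split(':') is never empty, so [0] never raises)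
def strainKey (s : String) : String := PySem.List.pyGetD ((PySem.Str.split? s ":").getD []) 0 ""

-- set([_.split(':')[0] for _ in c])
def strainsOf (c : List String) : List String := PySem.Set.ofList (c.map strainKey)

-- ===== PORT A =====
def has_para_loop (S : List String) : List (List String) → Bool
  | [] => false
  | c :: cs =>
    let t := strainsOf c
    if PySem.Set.inter S t ≠ [] then true
    else has_para_loop (PySem.Set.union S t) cs

def has_para (clusts : List (List String)) : Bool :=
  match clusts with
  | [] => false  -- Python raises IndexError here (clusts[0]); excluded by Pre_has_para
  | a :: rest => has_para_loop (strainsOf a) rest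

-- ===== PORT B =====
def has_para_alt (clusts : List (List String)) : Bool :=
  let flat := clusts.flatMap (fun c => strainsOf c)
  decide (flat.length ≠ (PySem.Set.ofList flat).length)

-- ===== PRECONDITION & SPEC =====
-- Pre_ excludes only the empty list, on which Python A raises IndexError at clusts[0].
def Pre_has_para (clusts : List (List String)) : Prop := clusts.isEmpty = false
instance (clusts : List (List String)) : Decidable (Pre_has_para clusts) := by unfold Pre_has_para; infer_instance
def pvWitness_has_para : List (List String) := [["a:1"]]

def Spec_has_para (clusts : List (List String)) (out : Bool) : Prop := out = has_para_alt clusts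
instance (clusts : List (List String)) (out : Bool) : Decidable (Spec_has_para clusts out) := by unfold Spec_has_para; infer_instance

-- ===== CLAIM (what is proved, stated in full; the proofs are below) =====
def Claim_equal_has_para : Prop := ∀ (clusts : List (List String)), Dom_has_para clusts → Pre_has_para clusts → Spec_has_para clusts (has_para clusts)

-- ===== LEMMAS AND PROOFS =====

theorem nodup_strainsOf (c : List String) : (strainsOf c).Nodup := PySem.Set.nodup_ofList _

-- len(xs) == len(set(xs)) iff xs has no duplicate
theorem ofList_length_eq_iff (xs : List String) :
    (PySem.Set.ofList xs).length = xs.length ↔ xs.Nodup := by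
  constructor
  · intro h
    have hn : (PySem.Set.ofList xs).Nodup := PySem.Set.nodup_ofList xs
    have hsub : (PySem.Set.ofList xs) ⊆ xs := fun x hx => (PySem.Set.mem_ofList _ _).mp hx
    have hsp := hn.subperm hsub
    exact (hsp.perm_of_length_le (le_of_eq h.symm)).nodup hn
  · intro h
    rw [PySem.Set.ofList_eq_self_of_nodup xs h]

-- Python's truthiness of S & t: empty iff disjoint
theorem inter_nil_iff (S t : List String) :
    PySem.Set.inter S t = [] ↔ ∀ x ∈ S, x ∉ t := by
  rw [List.eq_nil_iff_forall_not_mem]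
  constructor
  · intro h x hx hxt; exact h x ((PySem.Set.mem_inter _ _ _).mpr ⟨hx, hxt⟩)
  · intro h x hx
    rcases (PySem.Set.mem_inter _ _ _).mp hx with ⟨h1, h2⟩
    exact h x h1 h2

-- disjoint union of nodup sets is concatenation
theorem union_eq_append (t : List String) : ∀ (S : List String), t.Nodup → (∀ x ∈ t, x ∉ S) →
    PySem.Set.union S t = S ++ t := by
  induction t with
  | nil => intro S _ _; simp [PySem.Set.union, PySem.Set.update]
  | cons x ts ih =>
    intro S hnd hdisj
    have hx : x ∉ S := hdisj x (List.mem_cons_self ..)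
    have step : PySem.Set.add S x = S ++ [x] := by
      simp [PySem.Set.add, PySem.Set.contains, hx]
    have hnd' : ts.Nodup := (List.nodup_cons.mp hnd).2
    have hxts : x ∉ ts := (List.nodup_cons.mp hnd).1
    have hdisj' : ∀ y ∈ ts, y ∉ S ++ [x] := by
      intro y hy
      simp only [List.mem_append, List.mem_singleton]
      rintro (h | rfl)
      · exact hdisj y (List.mem_cons_of_mem _ hy) h
      · exact hxts hy
    have := ih (S ++ [x]) hnd' hdisj'
    simp only [PySem.Set.union, PySem.Set.update, List.foldl_cons] at *
    rw [step, this, List.append_assoc]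
    rfl

-- A's loop returns true iff the remaining flat strain list together with the seen set has a duplicate
theorem loop_eq (rest : List (List String)) : ∀ (S : List String), S.Nodup →
    has_para_loop S rest = !decide ((S ++ rest.flatMap (fun c => strainsOf c)).Nodup) := by
  induction rest with
  | nil => intro S hS; simp [has_para_loop, hS]
  | cons c cs ih =>
    intro S hS
    by_cases h : PySem.Set.inter S (strainsOf c) = []
    · have hdisj : ∀ x ∈ S, x ∉ strainsOf c := (inter_nil_iff _ _).mp h
      have hdisj' : ∀ x ∈ strainsOf c, x ∉ S := fun x hx hxS => hdisj x hxS hx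
      have hu : PySem.Set.union S (strainsOf c) = S ++ strainsOf c :=
        union_eq_append _ S (nodup_strainsOf c) hdisj'
      have hnd : (PySem.Set.union S (strainsOf c)).Nodup :=
        PySem.Set.nodup_union S (strainsOf c) hS
      rw [show has_para_loop S (c :: cs)
            = has_para_loop (PySem.Set.union S (strainsOf c)) cs by
          simp [has_para_loop, h]]
      rw [ih _ hnd, hu]
      simp [List.flatMap_cons, List.append_assoc]
    · rcases List.exists_mem_of_ne_nil _ h with ⟨x, hx⟩
      rcases (PySem.Set.mem_inter _ _ _).mp hx with ⟨hxS, hxt⟩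
      have hnot : ¬ (S ++ (strainsOf c ++ List.flatMap (fun c => strainsOf c) cs)).Nodup := by
        intro hnd
        have hdj := (List.nodup_append.mp hnd).2.2
        exact hdj x hxS x (List.mem_append_left _ hxt) rfl
      rw [show has_para_loop S (c :: cs) = true by simp [has_para_loop, h]]
      simp [List.flatMap_cons, hnot]

theorem alt_eq_nodup (clusts : List (List String)) :
    has_para_alt clusts = !decide ((clusts.flatMap (fun c => strainsOf c)).Nodup) := by
  unfold has_para_alt
  have key : ((clusts.flatMap (fun c => strainsOf c)).length
      ≠ (PySem.Set.ofList (clusts.flatMap (fun c => strainsOf c))).length)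
      ↔ ¬ (clusts.flatMap (fun c => strainsOf c)).Nodup := by
    rw [← ofList_length_eq_iff]
    exact ⟨fun h he => h he.symm, fun h he => h he.symm⟩
  rw [show (decide ((clusts.flatMap (fun c => strainsOf c)).length
      ≠ (PySem.Set.ofList (clusts.flatMap (fun c => strainsOf c))).length))
      = decide (¬ (clusts.flatMap (fun c => strainsOf c)).Nodup) from decide_eq_decide.mpr key,
    decide_not]

-- ===== VERDICT (by name: the statement is the Claim_ definition above) =====
theorem has_para_spec : Claim_equal_has_para := by
  intro clusts _ hpre
  unfold Spec_has_para
  cases clusts with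
  | nil => simp [Pre_has_para] at hpre
  | cons a rest =>
    rw [show has_para (a :: rest) = has_para_loop (strainsOf a) rest from rfl,
        loop_eq rest (strainsOf a) (nodup_strainsOf a), alt_eq_nodup]
    simp [List.flatMap_cons]
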